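-- pv_equiv track=rewrite | github.com/opengauss-mirror/openGauss-DBMind | dbmind/common/utils/checking.py | is_identifier_correct
-- ===== SOURCE A (Python) =====
-- def is_identifier_correct(url: str):
--     # A correct DSN url is similar to:
--     # 'postgres://{username}:{password}@{instance1},{instance2},{instance3}/{database}'
--     # Hence, we can limit the number of identifiers to prevent bad url.
--     identifiers = {
--         '@': 1,
--         '/': 3
--     }
--     for ident, limit in identifiers.items():
--         if url.count(ident) > limit:
--             return False, f"Incorrect URL because you haven't encoded the identifier '{ident}'."
--
--     return True, None
-- ===== SOURCE B (Python) =====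
-- def _has_n_occurrences(url: str, ch: str, n: int) -> bool:
--     # Search for the n-th occurrence of ch by repeated find; stops as soon as
--     # the search fails, without ever counting all occurrences.
--     pos = -1
--     for _ in range(n):
--         pos = url.find(ch, pos + 1)
--         if pos < 0:
--             return False
--     return True
--
--
-- def is_identifier_correct(url: str):
--     # Instead of counting occurrences, probe directly whether the URL contains
--     # one occurrence MORE than each identifier's limit (2nd '@', 4th '/').
--     if _has_n_occurrences(url, '@', 2):
--         return False, "Incorrect URL because you haven't encoded the identifier '@'."
--     if _has_n_occurrences(url, '/', 4):
--         return False, "Incorrect URL because you haven't encoded the identifier '/'."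
--     return True, None
-- ===== Notes on version B (the rewrite author's own statement) =====
-- stated objective: alternative
-- what changed: Replaces A's count-then-compare (a dict loop running url.count for each identifier) by a positional search: repeated str.find probes for the existence of the 2nd '@' / 4th '/' occurrence and stops at the first failed probe, never counting all occurrences.
import Mathlib
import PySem

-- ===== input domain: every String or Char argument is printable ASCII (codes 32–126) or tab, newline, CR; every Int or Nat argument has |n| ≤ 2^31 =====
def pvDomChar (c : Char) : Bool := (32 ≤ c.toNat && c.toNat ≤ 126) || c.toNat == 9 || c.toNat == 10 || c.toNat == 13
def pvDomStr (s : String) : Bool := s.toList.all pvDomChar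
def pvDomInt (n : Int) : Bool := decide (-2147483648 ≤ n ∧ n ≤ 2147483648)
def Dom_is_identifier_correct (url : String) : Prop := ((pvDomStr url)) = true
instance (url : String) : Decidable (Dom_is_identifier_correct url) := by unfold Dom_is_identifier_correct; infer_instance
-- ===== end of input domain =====

-- B replaces A's count-then-compare by a positional search: repeated str.find
-- probes for the existence of the 2nd '@' / 4th '/' occurrence (alternative
-- algorithm, same cost class; return values identical).

-- ===== PORT A =====
-- the 'for ident, limit in identifiers.items()' loop with its early return
def is_identifier_correct_loopA (url : String) : List (String × Int) → Bool × Option String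
  | [] => (true, none)
  | (ident, limit) :: rest =>
      if (PySem.Str.count url ident : Int) > limit then
        (false, some ("Incorrect URL because you haven't encoded the identifier '" ++ ident ++ "'."))
      else is_identifier_correct_loopA url rest

def is_identifier_correct (url : String) : Bool × Option String :=
  let identifiers : PySem.Dict String Int := (PySem.Dict.empty.insert "@" 1).insert "/" 3
  is_identifier_correct_loopA url identifiers.items

-- ===== PORT B =====
-- the 'for _ in range(n)' loop of _has_n_occurrences, recursing on the (Nat)
-- number of remaining probes with the last found position as state;
-- url.find(ch, pos + 1) is PySem.Str.findFrom
def has_n_occurrences_go (url : String) (ch : String) : Nat → Int → Bool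
  | 0, _ => true
  | n + 1, pos =>
      let p := PySem.Str.findFrom url ch (pos + 1) none
      if p < 0 then false else has_n_occurrences_go url ch n p

def has_n_occurrences (url : String) (ch : String) (n : Nat) : Bool :=
  has_n_occurrences_go url ch n (-1)

def is_identifier_correct_alt (url : String) : Bool × Option String :=
  if has_n_occurrences url "@" 2 then
    (false, some "Incorrect URL because you haven't encoded the identifier '@'.")
  else if has_n_occurrences url "/" 4 then
    (false, some "Incorrect URL because you haven't encoded the identifier '/'.")
  else (true, none)

-- ===== PRECONDITION & SPEC =====
def Spec_is_identifier_correct (url : String) (out : Bool × Option String) : Prop := out = is_identifier_correct_alt url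
instance (url : String) (out : Bool × Option String) : Decidable (Spec_is_identifier_correct url out) := by unfold Spec_is_identifier_correct; infer_instance

-- ===== CLAIM (what is proved, stated in full; the proofs are below) =====
def Claim_equal_is_identifier_correct : Prop := ∀ (url : String), Dom_is_identifier_correct url → Spec_is_identifier_correct url (is_identifier_correct url)

-- ===== LEMMAS AND PROOFS =====

-- single-character substring count is plain character count
theorem count_go_single (c : Char) :
    ∀ (l : List Char) (fuel acc : Nat), l.length ≤ fuel →
      PySem.Chars.count.go [c] fuel l acc = acc + l.count c := by
  intro l
  induction l with
  | nil =>
      intro fuel acc _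
      cases fuel <;> simp [PySem.Chars.count.go]
  | cons h t ih =>
      intro fuel acc hf
      cases fuel with
      | zero => simp at hf
      | succ n =>
          have ht : t.length ≤ n := by simpa using hf
          by_cases hc : c = h
          · subst hc
            simp [PySem.Chars.count.go, List.isPrefixOf, ih n (acc + 1) ht]
            omega
          · have hb : (c == h) = false := by simp [hc]
            have hb' : (h == c) = false := by simp [Ne.symm hc]
            simp [PySem.Chars.count.go, List.isPrefixOf, hb, hb',
                  ih n acc ht, List.count_cons]

theorem count_single (s : List Char) (c : Char) :
    PySem.Chars.count s [c] = s.count c := by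
  simpa using count_go_single c s s.length 0 (le_refl _)

-- a one-character prefix is just the head
theorem singleton_prefix_iff (c : Char) (t : List Char) :
    [c] <+: t ↔ t.head? = some c := by
  cases t with
  | nil => simp
  | cons h t' =>
      constructor
      · rintro ⟨r, hr⟩
        simp at hr
        simp [hr.1]
      · intro h'
        simp at h'
        exact ⟨t', by simp [h']⟩

-- drop past the FIRST occurrence at j (no occurrence in [k, j)): one 'c' is consumed
theorem count_drop_first (l : List Char) (c : Char) (k j : Nat)
    (hkj : k ≤ j) (hj : [c] <+: l.drop j)
    (hmin : ∀ i, k ≤ i → i < j → ¬ [c] <+: l.drop i) :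
    (l.drop k).count c = (l.drop (j + 1)).count c + 1 := by
  have hjlen : j < l.length := by
    rw [singleton_prefix_iff, List.head?_drop] at hj
    by_contra h
    rw [List.getElem?_eq_none (by omega)] at hj
    simp at hj
  -- the segment [k, j) contains no c
  have hseg : ((l.drop k).take (j - k)).count c = 0 := by
    rw [List.count_eq_zero]
    intro hmem
    obtain ⟨i, hi, hget⟩ := List.mem_iff_getElem.mp hmem
    have hi' : i < j - k := by
      have h2 : i < j - k ∧ i < l.length - k := by simpa [List.length_take] using hi
      exact h2.1
    have hik : k + i < j := by omega
    have hocc : [c] <+: l.drop (k + i) := by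
      rw [singleton_prefix_iff, List.head?_drop]
      have hilen : k + i < l.length := by omega
      rw [List.getElem?_eq_getElem hilen]
      have : l[k + i] = c := by
        have h1 : ((l.drop k).take (j - k))[i] = (l.drop k)[i]'(by
          simp [List.length_drop]; omega) := List.getElem_take
        rw [h1] at hget
        simpa [List.getElem_drop] using hget
      simp [this]
    exact hmin (k + i) (by omega) hik hocc
  -- position j carries c
  have hdj : l.drop j = c :: l.drop (j + 1) := by
    rw [singleton_prefix_iff, List.head?_drop] at hj
    have h1 : l.drop j = l[j] :: l.drop (j + 1) :=
      List.drop_eq_getElem_cons hjlen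
    rw [List.getElem?_eq_getElem hjlen] at hj
    simp at hj
    rw [h1, hj]
  have hsplit : l.drop k = (l.drop k).take (j - k) ++ l.drop j := by
    have h1 : (l.drop k).drop (j - k) = l.drop j := by
      rw [List.drop_drop]
      congr 1
      omega
    conv_lhs => rw [← List.take_append_drop (j - k) (l.drop k)]
    rw [h1]
  rw [hsplit, List.count_append, hseg, hdj]
  simp

-- B's probe loop decides 'at least n occurrences of c remain from position k'
theorem go_eq (url : String) (ch : String) (c : Char) (hch : ch.toList = [c]) :
    ∀ (n : Nat) (k : Nat), k ≤ url.toList.length →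
      has_n_occurrences_go url ch n ((k : Int) - 1)
        = decide (n ≤ (url.toList.drop k).count c) := by
  intro n
  induction n with
  | zero => intro k _; simp [has_n_occurrences_go]
  | succ n ih =>
      intro k hk
      have hstart : ((k : Int) - 1) + 1 = (k : Int) := by ring
      rw [has_n_occurrences_go]
      simp only [hstart, PySem.Str.findFrom_eq, hch]
      set l := url.toList with hl
      rw [PySem.Chars.findFrom_natCast l [c] k hk]
      by_cases hfind : PySem.Chars.find (l.drop k) [c] = -1
      · -- no occurrence from k on: count is 0, probe fails
        have hno : ¬ [c] <:+: l.drop k := (PySem.Chars.find_eq_neg_one_iff _ _).mp hfind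
        have hnomem : c ∉ l.drop k := by
          intro hmem
          rcases List.append_of_mem hmem with ⟨s1, s2, hsplit⟩
          exact hno ⟨s1, s2, by simp [hsplit]⟩
        have hcnt : (l.drop k).count c = 0 := List.count_eq_zero.mpr hnomem
        simp [hfind, hcnt]
      · -- first occurrence at k + j: consume it and recurse
        have hfge : (0 : Int) ≤ PySem.Chars.find (l.drop k) [c] := by
          have := PySem.Chars.neg_one_le_find (l.drop k) [c]
          omega
        have hnn : PySem.Chars.findFrom l [c] k none ≠ -1 := by
          rw [PySem.Chars.findFrom_natCast l [c] k hk]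
          simp only [hfind, if_false]
          omega
        obtain ⟨hge, hpre, hmin⟩ := PySem.Chars.findFrom_natCast_spec l [c] k hk hnn
        rw [PySem.Chars.findFrom_natCast l [c] k hk] at hge hpre hmin
        simp only [hfind, if_false] at hge hpre hmin ⊢
        set p : Int := (k : Int) + PySem.Chars.find (l.drop k) [c] with hp
        have hppos : (0 : Int) ≤ p := by omega
        have hnotlt : ¬ p < 0 := by omega
        have hjlt : p.toNat < l.length := by
          have hne : l.drop p.toNat ≠ [] := by
            rw [singleton_prefix_iff] at hpre
            intro h0; rw [h0] at hpre; simp at hpre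
          have := List.drop_eq_nil_iff.not.mp hne
          omega
        have hpeq : p = ((p.toNat + 1 : Nat) : Int) - 1 := by omega
        rw [if_neg hnotlt, hpeq, ih (p.toNat + 1) (by omega)]
        have hkp : k ≤ p.toNat := by omega
        have hmin' : ∀ i, k ≤ i → i < p.toNat → ¬ [c] <+: l.drop i := by
          intro i hki hip
          exact hmin i (by exact_mod_cast hki) (by omega)
        rw [count_drop_first l c k p.toNat hkp hpre hmin']
        simp

theorem has_n_eq (url : String) (ch : String) (c : Char) (hch : ch.toList = [c]) (n : Nat) :
    has_n_occurrences url ch n = decide (n ≤ url.toList.count c) := by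
  have := go_eq url ch c hch n 0 (Nat.zero_le _)
  simpa [has_n_occurrences] using this

-- ===== VERDICT (by name: the statement is the Claim_ definition above) =====
theorem is_identifier_correct_spec : Claim_equal_is_identifier_correct := by
  intro url _
  unfold Spec_is_identifier_correct is_identifier_correct is_identifier_correct_alt
  have hitems : ((PySem.Dict.empty.insert "@" (1 : Int)).insert "/" 3).items
      = [("@", 1), ("/", 3)] := by decide
  have hat : PySem.Str.count url "@" = url.toList.count '@' := by
    simp [PySem.Str.count_eq]; exact count_single url.toList '@'
  have hsl : PySem.Str.count url "/" = url.toList.count '/' := by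
    simp [PySem.Str.count_eq]; exact count_single url.toList '/'
  have hb1 := has_n_eq url "@" '@' (by decide) 2
  have hb2 := has_n_eq url "/" '/' (by decide) 4
  have m1 : "Incorrect URL because you haven't encoded the identifier '" ++ "@" ++ "'."
      = "Incorrect URL because you haven't encoded the identifier '@'." := rfl
  have m2 : "Incorrect URL because you haven't encoded the identifier '" ++ "/" ++ "'."
      = "Incorrect URL because you haven't encoded the identifier '/'." := rfl
  have h1' : ((1 : Int) < (url.toList.count '@' : Int)) ↔ 2 ≤ url.toList.count '@' := by
    omega
  have h2' : ((3 : Int) < (url.toList.count '/' : Int)) ↔ 4 ≤ url.toList.count '/' := by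
    omega
  simp only [hitems, is_identifier_correct_loopA, hat, hsl, hb1, hb2, m1, m2,
    gt_iff_lt, h1', h2', decide_eq_true_eq]
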